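-- pv_equiv track=rewrite | github.com/BryanMcHugh/IP-calculator | ip_calculator.py | first_ip
-- ===== SOURCE A (Python) =====
-- def first_ip(ip_bin):
-- 	first = ""
-- 	p = 0
-- 	for i in ip_bin:
-- 	    if p == 0:
-- 	        if i == "0":
-- 	            first += "0"
-- 	            p = 1
-- 	        else:
-- 	            first += "1"
-- 	    else:
-- 	        if i == ".":
-- 	            first += "."
-- 	        else:
-- 	            first += "0"
-- 	return first
-- ===== SOURCE B (Python) =====
-- def first_ip(ip_bin):
--     idx = ip_bin.find("0")
--     if idx == -1:
--         return "1" * len(ip_bin)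
--     return "1" * idx + "".join("." if c == "." else "0" for c in ip_bin[idx:])
-- ===== Notes on version B (the rewrite author's own statement) =====
-- stated objective: simpler
-- what changed: Replaces the character-by-character state machine with a find-then-transform decomposition: locate the first zero character once with str.find, emit the ones-prefix by string multiplication, and map only the suffix.
import Mathlib
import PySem

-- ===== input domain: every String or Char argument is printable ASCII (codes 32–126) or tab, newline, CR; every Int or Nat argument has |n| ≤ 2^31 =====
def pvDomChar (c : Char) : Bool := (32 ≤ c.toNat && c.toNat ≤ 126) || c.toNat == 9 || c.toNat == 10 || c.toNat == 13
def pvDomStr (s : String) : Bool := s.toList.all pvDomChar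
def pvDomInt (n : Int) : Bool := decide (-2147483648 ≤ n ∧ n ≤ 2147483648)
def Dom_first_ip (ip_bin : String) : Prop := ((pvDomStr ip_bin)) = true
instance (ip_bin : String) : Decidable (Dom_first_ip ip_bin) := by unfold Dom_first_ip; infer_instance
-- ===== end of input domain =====

-- B replaces A's character-by-character state machine by a find-then-transform
-- decomposition (locate the first '0', emit a '1'-prefix, map the suffix): simpler.


-- ===== PORT A =====
-- the loop body of A: state (first, p)
def stepA (st : List Char × Int) (i : Char) : List Char × Int :=
  if st.2 == 0 then
    if i == '0' then (st.1 ++ ['0'], 1) else (st.1 ++ ['1'], st.2)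
  else
    if i == '.' then (st.1 ++ ['.'], st.2) else (st.1 ++ ['0'], st.2)

def first_ip (ip_bin : String) : String :=
  String.mk (ip_bin.toList.foldl stepA ([], 0)).1

-- ===== PORT B =====
-- the comprehension body: '.' if c == '.' else '0'
def gAlt (c : Char) : Char := if c == '.' then '.' else '0'

def first_ip_alt (ip_bin : String) : String :=
  let idx := PySem.Str.find ip_bin "0"
  if idx = -1 then String.mk (List.replicate ip_bin.toList.length '1')
  else
    -- idx ≥ 0 here, so the slice ip_bin[idx:] is exactly drop idx.toNat
    String.mk (List.replicate idx.toNat '1' ++ (ip_bin.toList.drop idx.toNat).map gAlt)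

-- ===== PRECONDITION & SPEC =====
def Spec_first_ip (ip_bin : String) (out : String) : Prop := out = first_ip_alt ip_bin
instance (ip_bin : String) (out : String) : Decidable (Spec_first_ip ip_bin out) := by unfold Spec_first_ip; infer_instance

-- ===== CLAIM (what is proved, stated in full; the proofs are below) =====
def Claim_equal_first_ip : Prop := ∀ (ip_bin : String), Dom_first_ip ip_bin → Spec_first_ip ip_bin (first_ip ip_bin)

-- ===== LEMMAS AND PROOFS =====

-- after the first '0' (p = 1) A maps '.' to '.' and everything else to '0'
theorem loop_p1 (l : List Char) (acc : List Char) :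
    l.foldl stepA (acc, 1) = (acc ++ l.map gAlt, 1) := by
  induction l generalizing acc with
  | nil => simp
  | cons c t ih =>
      simp only [List.foldl_cons, stepA]
      by_cases h : c = '.' <;> simp [h, ih, gAlt]

-- before the first '0' (p = 0) A maps every character to '1'
theorem loop_p0_no0 (u : List Char) (acc : List Char) (h : '0' ∉ u) :
    u.foldl stepA (acc, 0) = (acc ++ List.replicate u.length '1', 0) := by
  induction u generalizing acc with
  | nil => simp
  | cons c t ih =>
      simp only [List.mem_cons, not_or] at h
      have hc : ¬ c = '0' := fun e => h.1 e.symm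
      simp only [List.foldl_cons]
      rw [show stepA (acc, 0) c = (acc ++ ['1'], 0) by simp [stepA, hc]]
      rw [ih _ h.2]
      simp [List.replicate_succ]

theorem singleton_prefix_iff (v : List Char) :
    ['0'] <+: v ↔ ∃ t, v = '0' :: t := by
  constructor
  · rintro ⟨t, rfl⟩; exact ⟨t, rfl⟩
  · rintro ⟨t, rfl⟩; exact ⟨t, rfl⟩

theorem first_ip_spec_list (l : List Char) :
    (l.foldl stepA ([], 0)).1 =
      (if PySem.Chars.find l ['0'] = -1 then List.replicate l.length '1'
       else List.replicate (PySem.Chars.find l ['0']).toNat '1' ++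
            (l.drop (PySem.Chars.find l ['0']).toNat).map gAlt) := by
  by_cases h : PySem.Chars.find l ['0'] = -1
  · -- no '0' anywhere: p stays 0 throughout
    have hinf := (PySem.Chars.find_eq_neg_one_iff l ['0']).mp h
    have hnin : '0' ∉ l := by
      intro hm
      obtain ⟨u, v, huv⟩ := List.append_of_mem hm
      exact hinf ⟨u, v, by simp [huv]⟩
    rw [loop_p0_no0 l [] hnin, if_pos h]
    simp
  · have hnn : 0 ≤ PySem.Chars.find l ['0'] := by
      rcases (PySem.Chars.neg_one_le_find l ['0']).lt_or_eq with h' | h'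
      · omega
      · exact absurd h'.symm h
    set k := (PySem.Chars.find l ['0']).toNat with hk
    obtain ⟨hpref, hmin⟩ := PySem.Chars.find_spec (s := l) (sub := ['0']) hnn
    obtain ⟨rest, hrest⟩ := (singleton_prefix_iff _).mp hpref
    have hklen : k < l.length := by
      by_contra hge
      push_neg at hge
      rw [List.drop_eq_nil_of_le hge] at hrest
      exact absurd hrest (by simp)
    have hno0 : '0' ∉ l.take k := by
      intro hm
      obtain ⟨i, hi, hgi⟩ := List.mem_iff_getElem.mp hm
      simp only [List.length_take] at hi
      have hik : i < k := lt_of_lt_of_le hi (min_le_left _ _)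
      have hil : i < l.length := lt_of_lt_of_le hi (min_le_right _ _)
      refine hmin i hik ?_
      rw [List.drop_eq_getElem_cons hil]
      have hgi' : l[i] = '0' := by simpa [List.getElem_take] using hgi
      rw [hgi']
      exact ⟨_, rfl⟩
    have hsplit : l = l.take k ++ '0' :: rest := by
      conv_lhs => rw [← List.take_append_drop k l]
      rw [hrest]
    have hlen : (l.take k).length = k := by
      simp only [List.length_take]; omega
    rw [if_neg h]
    calc (l.foldl stepA ([], 0)).1
        = ((l.take k ++ '0' :: rest).foldl stepA ([], 0)).1 := by rw [← hsplit]
      _ = List.replicate k '1' ++ (l.drop k).map gAlt := by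
          rw [List.foldl_append, loop_p0_no0 _ [] hno0]
          simp only [List.foldl_cons]
          rw [show stepA ((([] : List Char) ++ List.replicate (l.take k).length '1'), 0) '0' = ([] ++ List.replicate (l.take k).length '1' ++ ['0'], 1) by simp [stepA]]
          rw [loop_p1, hrest]
          simp [gAlt, List.length_take, Nat.min_eq_left hklen.le]

-- ===== VERDICT (by name: the statement is the Claim_ definition above) =====
theorem first_ip_spec : Claim_equal_first_ip := by
  intro s _
  unfold Spec_first_ip first_ip first_ip_alt
  simp only [PySem.Str.find_eq]
  rw [first_ip_spec_list s.toList]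
  have h0 : ("0".toList : List Char) = ['0'] := rfl
  rw [h0]
  split_ifs <;> rfl
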